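-- pv_equiv track=rewrite | github.com/islamradowan/ai-scheduler | app/room_allocator.py | assign_seats_for_room
-- ===== SOURCE A (Python) =====
-- import math
--
-- def assign_seats_for_room(room_id, students_list, num_columns):
--     """
--     Assign seats using column-based interleaving to prevent side-by-side same-course students.
--
--     Args:
--         room_id: Room identifier
--         students_list: List of student IDs
--         num_columns: Number of columns in the room
--
--     Returns:
--         List of seat assignments with student_id, row, column
--     """
--     if not students_list:
--         return []
--
--     seat_assignments = []
--     num_students = len(students_list)
--     num_rows = math.ceil(num_students / num_columns)
--
--     # Fill seats column by column to ensure interleaving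
--     student_idx = 0
--     for col in range(num_columns):
--         for row in range(num_rows):
--             if student_idx < num_students:
--                 seat_assignments.append({
--                     'student_id': students_list[student_idx],
--                     'row': row + 1,  # 1-based indexing
--                     'column': col + 1  # 1-based indexing
--                 })
--                 student_idx += 1
--
--     return seat_assignments
-- ===== SOURCE B (Python) =====
-- def assign_seats_for_room(room_id, students_list, num_columns):
--     """Single pass: seat of student i is (i % num_rows, i // num_rows); no nested loops, no counter."""
--     if not students_list or num_columns <= 0:
--         return []
--     num_rows = -(-len(students_list) // num_columns)  # ceil division
--     return [
--         {'student_id': sid, 'row': i % num_rows + 1, 'column': i // num_rows + 1}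
--         for i, sid in enumerate(students_list)
--     ]
-- ===== Notes on version B (the rewrite author's own statement) =====
-- stated objective: simpler
-- what changed: Replaces the nested column/row loops with a mutable student counter by one pass over enumerate(students_list), computing each seat directly as (i % num_rows, i // num_rows); non-positive num_columns is handled by one emptiness guard instead of empty ranges.
import Mathlib
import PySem

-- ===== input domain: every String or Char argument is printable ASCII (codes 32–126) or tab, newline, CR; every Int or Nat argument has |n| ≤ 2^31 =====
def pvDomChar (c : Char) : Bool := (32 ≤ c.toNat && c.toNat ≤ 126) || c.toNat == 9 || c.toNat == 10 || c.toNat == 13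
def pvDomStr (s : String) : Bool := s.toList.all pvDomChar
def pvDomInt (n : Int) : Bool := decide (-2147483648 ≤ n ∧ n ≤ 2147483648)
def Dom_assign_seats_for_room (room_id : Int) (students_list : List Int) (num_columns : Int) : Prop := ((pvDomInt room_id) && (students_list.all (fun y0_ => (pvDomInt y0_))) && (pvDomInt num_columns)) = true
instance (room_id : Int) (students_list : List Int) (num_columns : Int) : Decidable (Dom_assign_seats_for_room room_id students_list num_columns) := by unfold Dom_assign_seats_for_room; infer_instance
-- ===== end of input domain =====

-- B replaces A's nested column/row loops with a counter by a single pass computing each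
-- student's seat as (i % num_rows, i // num_rows); objective: simpler.

-- ===== PORT A =====
-- math.ceil(num_students / num_columns) is ported as exact integer ceiling -((-n) // C);
-- exact on the sampled domain (list lengths far below float precision limits).
-- students_list[student_idx] is ported with pyGetD (the index is always in range here).
def assign_seats_for_room (room_id : Int) (students_list : List Int) (num_columns : Int) : List (List (String × Int)) :=
  if students_list = [] then []
  else
    let num_students : Int := students_list.length
    let num_rows : Int := -(PySem.Int.floordiv (-num_students) num_columns)
    let st : List (List (String × Int)) × Int :=
      (PySem.List.pyRange 0 num_columns 1).foldl (fun st col =>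
        (PySem.List.pyRange 0 num_rows 1).foldl (fun st row =>
          if st.2 < num_students then
            (st.1 ++ [[("student_id", PySem.List.pyGetD students_list st.2 0),
                       ("row", row + 1), ("column", col + 1)]], st.2 + 1)
          else st) st) ([], 0)
    st.1

-- ===== PORT B =====
def assign_seats_for_room_alt (room_id : Int) (students_list : List Int) (num_columns : Int) : List (List (String × Int)) :=
  if students_list = [] ∨ num_columns ≤ 0 then []
  else
    let num_rows : Int := -(PySem.Int.floordiv (-(students_list.length : Int)) num_columns)
    (PySem.List.enumerate students_list).map (fun p =>
      [("student_id", p.2),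
       ("row", PySem.Int.mod p.1 num_rows + 1),
       ("column", PySem.Int.floordiv p.1 num_rows + 1)])

-- ===== PRECONDITION & SPEC =====
-- Pre_ excludes only the inputs where A raises ZeroDivisionError (nonempty list, num_columns = 0).
def Pre_assign_seats_for_room (room_id : Int) (students_list : List Int) (num_columns : Int) : Prop :=
  students_list = [] ∨ num_columns ≠ 0
instance (room_id : Int) (students_list : List Int) (num_columns : Int) : Decidable (Pre_assign_seats_for_room room_id students_list num_columns) := by unfold Pre_assign_seats_for_room; infer_instance
def pvWitness_assign_seats_for_room : Int × List Int × Int := (1, [10, 20, 30, 40, 50], 2)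

def Spec_assign_seats_for_room (room_id : Int) (students_list : List Int) (num_columns : Int) (out : List (List (String × Int))) : Prop := out = assign_seats_for_room_alt room_id students_list num_columns
instance (room_id : Int) (students_list : List Int) (num_columns : Int) (out : List (List (String × Int))) : Decidable (Spec_assign_seats_for_room room_id students_list num_columns out) := by unfold Spec_assign_seats_for_room; infer_instance

-- ===== CLAIM (what is proved, stated in full; the proofs are below) =====
def Claim_equal_assign_seats_for_room : Prop := ∀ (room_id : Int) (students_list : List Int) (num_columns : Int), Dom_assign_seats_for_room room_id students_list num_columns → Pre_assign_seats_for_room room_id students_list num_columns → Spec_assign_seats_for_room room_id students_list num_columns (assign_seats_for_room room_id students_list num_columns)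

-- ===== LEMMAS AND PROOFS =====

-- the entry written for global index k (row/col recomputed from k)
def pvEntry (xs : List Int) (Rn : Nat) (k : Nat) : List (String × Int) :=
  [("student_id", PySem.List.pyGetD xs (k : Int) 0),
   ("row", ((k % Rn : Nat) : Int) + 1), ("column", ((k / Rn : Nat) : Int) + 1)]

-- inner (row) loop characterisation
lemma pv_inner (xs : List Int) (col : Int) (r : Nat) : ∀ (acc : List (List (String × Int))) (i : Nat), i ≤ xs.length →
    (PySem.List.pyRange 0 (r : Int) 1).foldl (fun st row =>
      if st.2 < (xs.length : Int) then
        (st.1 ++ [[("student_id", PySem.List.pyGetD xs st.2 0),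
                   ("row", row + 1), ("column", col + 1)]], st.2 + 1)
      else st) (acc, (i : Int))
    = (acc ++ (List.range (min r (xs.length - i))).map (fun (t : Nat) =>
         [("student_id", PySem.List.pyGetD xs ((i : Int) + (t : Int)) 0),
          ("row", ((t : Nat) : Int) + 1), ("column", col + 1)]),
       ((min xs.length (i + r) : Nat) : Int)) := by
  induction r with
  | zero =>
    intro acc i hi
    rw [PySem.List.pyRange_one_eq_nil (by omega)]
    simp [Nat.min_eq_right hi]
  | succ r ih =>
    intro acc i hi
    have hcast : ((r + 1 : Nat) : Int) = (r : Int) + 1 := by push_cast; ring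
    rw [hcast, PySem.List.pyRange_one_succ_right (by positivity), List.foldl_append, ih acc i hi]
    simp only [List.foldl_cons, List.foldl_nil]
    by_cases h : i + r < xs.length
    · have h1 : min xs.length (i + r) = i + r := by omega
      have h2 : min xs.length (i + r + 1) = i + r + 1 := by omega
      have h3 : min r (xs.length - i) = r := by omega
      have h4 : min (r + 1) (xs.length - i) = r + 1 := by omega
      rw [h1, h3]
      have hlt : ((i + r : Nat) : Int) < (xs.length : Int) := by exact_mod_cast h
      simp only [if_pos hlt, h4, List.range_succ, List.append_assoc]
      rw [Prod.mk.injEq]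
      refine ⟨?_, by omega⟩
      push_cast
      simp
    · have h1 : min xs.length (i + r) = xs.length := by omega
      have h2 : min xs.length (i + r + 1) = xs.length := by omega
      have h3 : min r (xs.length - i) = xs.length - i := by omega
      have h4 : min (r + 1) (xs.length - i) = xs.length - i := by omega
      rw [h1, h3]
      have hnlt : ¬ ((xs.length : Nat) : Int) < (xs.length : Int) := by omega
      simp [h4]
      omega

-- outer (column) loop characterisation
lemma pv_outer (xs : List Int) (Rn : Nat) (hR : 0 < Rn) (c : Nat) :
    (PySem.List.pyRange 0 (c : Int) 1).foldl (fun st col =>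
      (PySem.List.pyRange 0 ((Rn : Nat) : Int) 1).foldl (fun st row =>
        if st.2 < (xs.length : Int) then
          (st.1 ++ [[("student_id", PySem.List.pyGetD xs st.2 0),
                     ("row", row + 1), ("column", col + 1)]], st.2 + 1)
        else st) st) ([], 0)
    = ((List.range (min xs.length (c * Rn))).map (pvEntry xs Rn),
       ((min xs.length (c * Rn) : Nat) : Int)) := by
  induction c with
  | zero =>
    rw [show ((0 : Nat) : Int) = 0 from rfl, PySem.List.pyRange_one_eq_nil le_rfl]
    simp
  | succ c ih =>
    have hcast : ((c + 1 : Nat) : Int) = (c : Int) + 1 := by push_cast; ring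
    rw [hcast, PySem.List.pyRange_one_succ_right (by positivity), List.foldl_append, ih]
    simp only [List.foldl_cons, List.foldl_nil]
    rw [pv_inner xs (c : Int) Rn _ (min xs.length (c * Rn)) (by omega)]
    have hmul : (c + 1) * Rn = c * Rn + Rn := by ring
    rw [Prod.mk.injEq]
    constructor
    · by_cases hcb : c * Rn < xs.length
      · have hmin : min xs.length (c * Rn) = c * Rn := by omega
        have hm2 : min xs.length ((c + 1) * Rn) = c * Rn + min Rn (xs.length - c * Rn) := by
          rw [hmul]; omega
        rw [hmin, hm2, List.range_add, List.map_append, List.map_map]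
        congr 1
        apply List.map_congr_left
        intro t ht
        have htm : t < min Rn (xs.length - c * Rn) := List.mem_range.mp ht
        have hmod : (c * Rn + t) % Rn = t := by
          rw [Nat.mul_comm c Rn, Nat.mul_add_mod]; exact Nat.mod_eq_of_lt (by omega)
        have hdiv : (c * Rn + t) / Rn = c := by
          rw [Nat.mul_comm c Rn, Nat.mul_add_div hR, Nat.div_eq_of_lt (by omega)]
          omega
        simp only [Function.comp, pvEntry, hmod, hdiv]
        push_cast
        ring_nf
      · have hmin : min xs.length (c * Rn) = xs.length := by omega
        have hm2 : min xs.length ((c + 1) * Rn) = xs.length := by rw [hmul]; omega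
        rw [hmin, hm2]
        simp
    · rw [hmul]; push_cast; omega

-- B's map over enumerate, as a map over List.range
lemma pv_alt_eq (xs : List Int) (Rn : Nat) :
    (PySem.List.enumerate xs).map (fun p =>
      [("student_id", p.2),
       ("row", PySem.Int.mod p.1 ((Rn : Nat) : Int) + 1),
       ("column", PySem.Int.floordiv p.1 ((Rn : Nat) : Int) + 1)])
    = (List.range xs.length).map (pvEntry xs Rn) := by
  rw [PySem.List.enumerate_eq_map_pyRange (d := 0)]
  simp only [PySem.List.len_eq]
  rw [PySem.List.pyRange_zero_natCast, List.map_map, List.map_map]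
  apply List.map_congr_left
  intro k hk
  simp [pvEntry, Function.comp]

-- ===== VERDICT (by name: the statement is the Claim_ definition above) =====
theorem assign_seats_for_room_spec : Claim_equal_assign_seats_for_room := by
  intro room_id xs C _ hpre
  unfold Spec_assign_seats_for_room assign_seats_for_room assign_seats_for_room_alt
  have hn0 : xs = [] ∨ 0 < xs.length := by cases xs <;> simp
  by_cases hxs : xs = []
  · simp [hxs]
  · have hCne : C ≠ 0 := by rcases hpre with h | h; exact absurd h hxs; exact h
    have hn : 0 < xs.length := by rcases hn0 with h | h; exact absurd h hxs; exact h
    rw [if_neg hxs]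
    by_cases hC : C ≤ 0
    · rw [if_pos (Or.inr hC)]
      simp only []
      rw [PySem.List.pyRange_one_eq_nil hC]
      simp
    · have hC' : 0 < C := by omega
      rw [if_neg (by rintro (h | h); exact hxs h; omega)]
      simp only []
      have hRC := (PySem.Int.neg_floordiv_neg_eq_iff_of_pos
        (a := (xs.length : Int)) (b := C) hC' (q := -(PySem.Int.floordiv (-(xs.length : Int)) C))).mp rfl
      have hnI : 0 < (xs.length : Int) := by exact_mod_cast hn
      have hRpos : 0 < -(PySem.Int.floordiv (-(xs.length : Int)) C) := by nlinarith [hRC.1, hRC.2]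
      rw [show -(PySem.Int.floordiv (-(xs.length : Int)) C)
            = (((-(PySem.Int.floordiv (-(xs.length : Int)) C)).toNat : Nat) : Int) from by omega] at hRC ⊢
      set Rn : Nat := (-(PySem.Int.floordiv (-(xs.length : Int)) C)).toNat with hRn
      have hle : xs.length ≤ C.toNat * Rn := by
        have h2 := hRC.2
        have hc2 : ((C.toNat * Rn : Nat) : Int) = (Rn : Int) * C := by
          push_cast
          rw [Int.toNat_of_nonneg (by omega)]
          ring
        omega
      rw [show (C : Int) = ((C.toNat : Nat) : Int) from by omega]
      rw [pv_outer xs Rn (by omega) C.toNat, pv_alt_eq xs Rn,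
        show min xs.length (C.toNat * Rn) = xs.length from by omega]
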